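-- pv_equiv track=rewrite | github.com/salchivann/Proyecto-programacion | modules/logic.py | rutas_mas_economica_cara
-- ===== SOURCE A (Python) =====
-- def buscar_todas_rutas(origen, destino, grafo, visitados=None, ruta_actual=None):
--     if visitados is None: visitados = set()
--     if ruta_actual is None: ruta_actual = []
--
--     visitados.add(origen)
--     ruta_actual.append(origen)
--
--     rutas_encontradas = []
--
--     if origen == destino:
--         rutas_encontradas.append(list(ruta_actual))
--     else:
--         for vecino, _ in grafo.get(origen, []):
--             if vecino not in visitados:
--                 rutas_recursivas = buscar_todas_rutas(vecino, destino, grafo, visitados.copy(), list(ruta_actual))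
--                 rutas_encontradas.extend(rutas_recursivas)
--
--     return rutas_encontradas
--
-- def rutas_mas_economica_cara(origen, destino, grafo):
--     todas_rutas = buscar_todas_rutas(origen, destino, grafo)
--
--     if not todas_rutas:
--         return None, None, 0, 0
--
--     mejor_ruta = None
--     peor_ruta = None
--     menor_costo = float('inf')
--     mayor_costo = 0
--
--     for ruta in todas_rutas:
--         costo_total = 0
--         for i in range(len(ruta) - 1):
--             for vecino, costo in grafo[ruta[i]]:
--                 if vecino == ruta[i + 1]:
--                     costo_total += costo
--                     break
--
--         if costo_total < menor_costo:
--             menor_costo = costo_total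
--             mejor_ruta = ruta
--
--         if costo_total > mayor_costo:
--             mayor_costo = costo_total
--             peor_ruta = ruta
--
--     return mejor_ruta, peor_ruta, menor_costo, mayor_costo
-- ===== SOURCE B (Python) =====
-- def rutas_mas_economica_cara(origen, destino, grafo):
--     # Single DFS that threads the running path cost and updates the four
--     # accumulators on arrival, instead of collecting all paths and rescanning.
--     def costo_arista(u, v):
--         for w, c in grafo.get(u, []):
--             if w == v:
--                 return c
--         return 0
--
--     best = {'mejor': None, 'menor': None, 'peor': None, 'mayor': 0}
--
--     def dfs(nodo, visitados, ruta, acumulado):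
--         if nodo == destino:
--             if best['menor'] is None or acumulado < best['menor']:
--                 best['menor'] = acumulado
--                 best['mejor'] = ruta
--             if acumulado > best['mayor']:
--                 best['mayor'] = acumulado
--                 best['peor'] = ruta
--             return
--         for vecino, _ in grafo.get(nodo, []):
--             if vecino not in visitados:
--                 dfs(vecino, visitados | {vecino}, ruta + [vecino],
--                     acumulado + costo_arista(nodo, vecino))
--
--     dfs(origen, {origen}, [origen], 0)
--     if best['mejor'] is None:
--         return None, None, 0, 0
--     return best['mejor'], best['peor'], best['menor'], best['mayor']
-- ===== Notes on version B (the rewrite author's own statement) =====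
-- stated objective: alternative
-- what changed: Instead of collecting every simple path into a list and then rescanning each path with a nested index loop to recompute its cost, B runs a single recursive DFS that threads the running path cost and updates the four best/worst accumulators the moment a path reaches destino.
import Mathlib
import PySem

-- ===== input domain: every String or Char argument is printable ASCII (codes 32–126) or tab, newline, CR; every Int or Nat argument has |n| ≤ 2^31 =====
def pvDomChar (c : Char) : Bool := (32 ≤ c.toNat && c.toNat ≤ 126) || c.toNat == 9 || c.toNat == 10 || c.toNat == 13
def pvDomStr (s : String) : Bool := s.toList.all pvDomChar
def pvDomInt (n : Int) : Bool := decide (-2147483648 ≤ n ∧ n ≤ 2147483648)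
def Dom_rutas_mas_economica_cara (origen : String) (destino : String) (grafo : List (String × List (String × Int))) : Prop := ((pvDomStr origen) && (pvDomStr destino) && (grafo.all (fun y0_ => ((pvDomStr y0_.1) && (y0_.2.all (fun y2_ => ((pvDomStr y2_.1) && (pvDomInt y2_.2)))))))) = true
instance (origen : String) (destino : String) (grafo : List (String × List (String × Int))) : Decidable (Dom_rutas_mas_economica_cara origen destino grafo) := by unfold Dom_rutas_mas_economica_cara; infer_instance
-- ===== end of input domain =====

-- B replaces A's build-all-paths-then-rescan with a single DFS that threads the
-- running path cost and updates the four accumulators on arrival (objective: alternative decomposition).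

-- shared primitive: Python's grafo.get(u, []) on the association list (first match)
def pvGet (grafo : List (String × List (String × Int))) (u : String) : List (String × Int) :=
  match grafo.find? (fun p => p.1 == u) with
  | some p => p.2
  | none => []

-- all node names mentioned in grafo (termination measure universe)
def pvNodes (grafo : List (String × List (String × Int))) : List String :=
  grafo.flatMap (fun p => p.1 :: p.2.map Prod.fst)

-- state tuple: (mejor_ruta, peor_ruta, menor_costo, mayor_costo); menor = none encodes float('inf')
-- (the none default in the final projection is never reached: any visited path sets menor)

lemma pv_mem_nodes {grafo : List (String × List (String × Int))} {u : String}
    {q : String × Int} (hq : q ∈ pvGet grafo u) : q.1 ∈ pvNodes grafo := by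
  unfold pvGet at hq
  cases hfind : grafo.find? (fun p => p.1 == u) with
  | none => simp [hfind] at hq
  | some p =>
    rw [hfind] at hq
    have hp : p ∈ grafo := List.mem_of_find?_eq_some hfind
    unfold pvNodes
    exact List.mem_flatMap.mpr ⟨p, hp,
      List.mem_cons.mpr (Or.inr (List.mem_map.mpr ⟨q, hq, rfl⟩))⟩

lemma pv_contains_true {V : PySem.Set String} {x : String} (h : x ∈ V) :
    PySem.Set.contains V x = true := (PySem.Set.contains_iff V x).mpr h

lemma pv_contains_false {V : PySem.Set String} {x : String} (h : x ∉ V) :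
    PySem.Set.contains V x = false := by
  by_contra hc
  exact h ((PySem.Set.contains_iff V x).mp (by simpa using hc))

lemma pv_countP_lt {α : Type} (l : List α) (p q : α → Bool)
    (himp : ∀ x, q x = true → p x = true) (a : α) (ha : a ∈ l)
    (hp : p a = true) (hq : q a = false) : l.countP q < l.countP p := by
  induction l with
  | nil => simp at ha
  | cons x t ih =>
    have hmono : t.countP q ≤ t.countP p := List.countP_mono_left (fun x hx h => himp x h)
    rcases List.mem_cons.mp ha with rfl | hat
    · simp [hp, hq]; omega
    · have := ih hat
      by_cases hqx : q x = true
      · simp [hqx, himp x hqx]; omega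
      · simp at hqx
        simp [hqx]
        by_cases hpx : p x = true <;> simp [hpx] <;> omega

lemma pv_imp_add (V : PySem.Set String) (w : String) :
    ∀ x, (!(PySem.Set.contains (PySem.Set.add V w) x)) = true →
      (!(PySem.Set.contains V x)) = true := by
  intro x h
  by_cases hx : x ∈ V
  · have hc : PySem.Set.contains (PySem.Set.add V w) x = true :=
      pv_contains_true ((PySem.Set.mem_add V w x).mpr (Or.inl hx))
    rw [hc] at h
    simp at h
  · rw [pv_contains_false hx]; rfl

lemma pv_measure_lt (grafo : List (String × List (String × Int)))
    (V : PySem.Set String) (w : String) (hw : PySem.Set.contains V w = false)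
    (hmem : w ∈ pvNodes grafo) :
    (pvNodes grafo).countP (fun x => !(PySem.Set.contains (PySem.Set.add V w) x))
      < (pvNodes grafo).countP (fun x => !(PySem.Set.contains V x)) := by
  apply pv_countP_lt _ _ _ (pv_imp_add V w) w hmem
  · rw [hw]; rfl
  · have hc : PySem.Set.contains (PySem.Set.add V w) w = true :=
      pv_contains_true ((PySem.Set.mem_add V w w).mpr (Or.inr rfl))
    rw [hc]; rfl

-- ===== PORT A =====
-- inner loop 'for vecino, costo in grafo[ruta[i]]: if vecino == ruta[i+1]: total += costo; break'
def pvAddFirst (l : List (String × Int)) (v : String) (total : Int) : Int :=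
  match l with
  | [] => total
  | (w, c) :: rest => if w == v then total + c else pvAddFirst rest v total

-- 'for i in range(len(ruta)-1)' ported as a fold over consecutive pairs (ruta[i], ruta[i+1]):
-- same values in the same order, indices always in range; grafo[ruta[i]] exists for every
-- path buscar produces, so the [] default of pvGet is never used here.
def pvCostoA (grafo : List (String × List (String × Int))) (ruta : List String) : Int :=
  (ruta.zip ruta.tail).foldl (fun total uv => pvAddFirst (pvGet grafo uv.1) uv.2 total) 0

def pvBuscar (destino : String) (grafo : List (String × List (String × Int)))
    (origen : String) (visitados : PySem.Set String) (ruta : List String) :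
    List (List String) :=
  let visitados1 := PySem.Set.add visitados origen
  let ruta1 := ruta ++ [origen]
  if origen == destino then [ruta1]
  else (pvGet grafo origen).attach.foldl
    (fun acc p =>
      if PySem.Set.contains visitados1 p.1.1 then acc
      else acc ++ pvBuscar destino grafo p.1.1 visitados1 ruta1) []
termination_by (pvNodes grafo).countP (fun x => !(PySem.Set.contains (PySem.Set.add visitados origen) x))
decreasing_by
  rename_i hne
  exact pv_measure_lt grafo (PySem.Set.add visitados origen) p.1.1
    (Bool.eq_false_iff.mpr hne) (pv_mem_nodes p.2)

def pvScanStep (grafo : List (String × List (String × Int)))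
    (s : Option (List String) × Option (List String) × Option Int × Int)
    (ruta : List String) :
    Option (List String) × Option (List String) × Option Int × Int :=
  let c := pvCostoA grafo ruta
  let s1 := if (match s.2.2.1 with | none => true | some m => decide (c < m)) then
              (some ruta, s.2.1, some c, s.2.2.2) else s
  if c > s1.2.2.2 then (s1.1, some ruta, s1.2.2.1, c) else s1

def rutas_mas_economica_cara (origen : String) (destino : String) (grafo : List (String × List (String × Int))) : Option (List String) × Option (List String) × Int × Int :=
  let todas := pvBuscar destino grafo origen PySem.Set.empty []
  if todas = [] then (none, none, 0, 0)
  else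
    let s := todas.foldl (pvScanStep grafo) (none, none, none, 0)
    (s.1, s.2.1, s.2.2.1.getD 0, s.2.2.2)

-- ===== PORT B =====
-- 'for w, c in grafo.get(u, []): if w == v: return c' / 'return 0'
def pvCostoAristaLoop (l : List (String × Int)) (v : String) : Int :=
  match l with
  | [] => 0
  | (w, c) :: rest => if w == v then c else pvCostoAristaLoop rest v

def pvCostoArista (grafo : List (String × List (String × Int))) (u v : String) : Int :=
  pvCostoAristaLoop (pvGet grafo u) v

-- the accumulator update performed on reaching destino
def pvVisita (ruta : List String) (c : Int)
    (s : Option (List String) × Option (List String) × Option Int × Int) :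
    Option (List String) × Option (List String) × Option Int × Int :=
  let s1 := if (match s.2.2.1 with | none => true | some m => decide (c < m)) then
              (some ruta, s.2.1, some c, s.2.2.2) else s
  if c > s1.2.2.2 then (s1.1, some ruta, s1.2.2.1, c) else s1

def pvDfs (destino : String) (grafo : List (String × List (String × Int)))
    (nodo : String) (visitados : PySem.Set String) (ruta : List String) (acum : Int)
    (s : Option (List String) × Option (List String) × Option Int × Int) :
    Option (List String) × Option (List String) × Option Int × Int :=
  if nodo == destino then pvVisita ruta acum s
  else (pvGet grafo nodo).attach.foldl
    (fun s p =>
      if PySem.Set.contains visitados p.1.1 then s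
      else pvDfs destino grafo p.1.1 (PySem.Set.add visitados p.1.1) (ruta ++ [p.1.1])
             (acum + pvCostoArista grafo nodo p.1.1) s) s
termination_by (pvNodes grafo).countP (fun x => !(PySem.Set.contains visitados x))
decreasing_by
  rename_i hne
  exact pv_measure_lt grafo visitados p.1.1 (Bool.eq_false_iff.mpr hne) (pv_mem_nodes p.2)

def rutas_mas_economica_cara_alt (origen : String) (destino : String) (grafo : List (String × List (String × Int))) : Option (List String) × Option (List String) × Int × Int :=
  let s := pvDfs destino grafo origen (PySem.Set.add PySem.Set.empty origen) [origen] 0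
             (none, none, none, 0)
  match s.1 with
  | none => (none, none, 0, 0)
  | some mejor => (some mejor, s.2.1, s.2.2.1.getD 0, s.2.2.2)

-- ===== PRECONDITION & SPEC =====
def Spec_rutas_mas_economica_cara (origen : String) (destino : String) (grafo : List (String × List (String × Int))) (out : Option (List String) × Option (List String) × Int × Int) : Prop := out = rutas_mas_economica_cara_alt origen destino grafo
instance (origen : String) (destino : String) (grafo : List (String × List (String × Int))) (out : Option (List String) × Option (List String) × Int × Int) : Decidable (Spec_rutas_mas_economica_cara origen destino grafo out) := by unfold Spec_rutas_mas_economica_cara; infer_instance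

-- ===== CLAIM (what is proved, stated in full; the proofs are below) =====
def Claim_equal_rutas_mas_economica_cara : Prop := ∀ (origen : String) (destino : String) (grafo : List (String × List (String × Int))), Dom_rutas_mas_economica_cara origen destino grafo → Spec_rutas_mas_economica_cara origen destino grafo (rutas_mas_economica_cara origen destino grafo)

-- ===== LEMMAS AND PROOFS =====

-- cost of a path = sum of first-matching edge costs over consecutive pairs
def pvPairCost (grafo : List (String × List (String × Int))) : List String → Int
  | u :: v :: rest => pvCostoArista grafo u v + pvPairCost grafo (v :: rest)
  | _ => 0

lemma pvAddFirst_eq (l : List (String × Int)) (v : String) (total : Int) :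
    pvAddFirst l v total = total + pvCostoAristaLoop l v := by
  induction l generalizing total with
  | nil => simp [pvAddFirst, pvCostoAristaLoop]
  | cons h t ih =>
    obtain ⟨w, c⟩ := h
    simp only [pvAddFirst, pvCostoAristaLoop]
    split
    · rfl
    · rw [ih]

lemma pvCostoA_eq_aux (grafo : List (String × List (String × Int))) :
    ∀ (ruta : List String) (t : Int),
      (ruta.zip ruta.tail).foldl (fun total uv => pvAddFirst (pvGet grafo uv.1) uv.2 total) t
        = t + pvPairCost grafo ruta := by
  intro ruta
  induction ruta with
  | nil => intro t; simp [pvPairCost]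
  | cons u rest ih =>
    intro t
    cases rest with
    | nil => simp [pvPairCost]
    | cons v rest' =>
      simp only [List.tail_cons, List.zip_cons_cons, List.foldl_cons] at ih ⊢
      rw [ih]
      simp only [pvPairCost, pvAddFirst_eq, pvCostoArista]
      omega

lemma pvCostoA_eq (grafo : List (String × List (String × Int))) (ruta : List String) :
    pvCostoA grafo ruta = pvPairCost grafo ruta := by
  unfold pvCostoA
  rw [pvCostoA_eq_aux]
  omega

lemma pvPairCost_snoc (grafo : List (String × List (String × Int)))
    (r : List String) (u w : String) :
    pvPairCost grafo (r ++ [u, w]) = pvPairCost grafo (r ++ [u]) + pvCostoArista grafo u w := by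
  induction r with
  | nil => simp [pvPairCost]
  | cons x r' ih =>
    cases r' with
    | nil => simp [pvPairCost]
    | cons z r'' =>
      simp only [List.cons_append] at ih ⊢
      simp only [pvPairCost] at ih ⊢
      omega

lemma pvScanStep_eq (grafo : List (String × List (String × Int)))
    (s : Option (List String) × Option (List String) × Option Int × Int)
    (ruta : List String) :
    pvScanStep grafo s ruta = pvVisita ruta (pvPairCost grafo ruta) s := by
  simp [pvScanStep, pvVisita, pvCostoA_eq]

-- main correspondence: threaded DFS = fold of pvVisita over the collected paths
lemma pvDfs_eq_fold (destino : String) (grafo : List (String × List (String × Int))) :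
    ∀ (N : Nat) (origen : String) (V : PySem.Set String) (r : List String)
      (s : Option (List String) × Option (List String) × Option Int × Int),
      (pvNodes grafo).countP (fun x => !(PySem.Set.contains (PySem.Set.add V origen) x)) < N →
      pvDfs destino grafo origen (PySem.Set.add V origen) (r ++ [origen])
          (pvPairCost grafo (r ++ [origen])) s
        = (pvBuscar destino grafo origen V r).foldl
            (fun s ruta => pvVisita ruta (pvPairCost grafo ruta) s) s := by
  intro N
  induction N with
  | zero => intro origen V r s h; exact absurd h (Nat.not_lt_zero _)
  | succ N ih =>
    intro origen V r s hN
    rw [pvDfs, pvBuscar]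
    by_cases hd : (origen == destino) = true
    · simp [hd]
    · simp only [hd, if_false, Bool.false_eq_true]
      have key : ∀ (l : List { q : String × Int // q ∈ pvGet grafo origen })
          (acc : List (List String))
          (s : Option (List String) × Option (List String) × Option Int × Int),
          l.foldl (fun s (p : { q : String × Int // q ∈ pvGet grafo origen }) =>
              if PySem.Set.contains (PySem.Set.add V origen) p.1.1 then s
              else pvDfs destino grafo p.1.1
                     (PySem.Set.add (PySem.Set.add V origen) p.1.1)
                     (r ++ [origen] ++ [p.1.1])
                     (pvPairCost grafo (r ++ [origen]) + pvCostoArista grafo origen p.1.1) s)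
            (acc.foldl (fun s ruta => pvVisita ruta (pvPairCost grafo ruta) s) s)
          = (l.foldl (fun acc (p : { q : String × Int // q ∈ pvGet grafo origen }) =>
              if PySem.Set.contains (PySem.Set.add V origen) p.1.1 then acc
              else acc ++ pvBuscar destino grafo p.1.1 (PySem.Set.add V origen) (r ++ [origen])) acc).foldl
              (fun s ruta => pvVisita ruta (pvPairCost grafo ruta) s) s := by
        intro l
        induction l with
        | nil => intro acc s; simp
        | cons p t iht =>
          intro acc s
          simp only [List.foldl_cons]
          by_cases hc : PySem.Set.contains (PySem.Set.add V origen) p.1.1 = true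
          · simp only [hc, if_true]
            exact iht acc s
          · simp only [hc, if_false, Bool.false_eq_true]
            have hcost : pvPairCost grafo (r ++ [origen]) + pvCostoArista grafo origen p.1.1
                = pvPairCost grafo (r ++ [origen] ++ [p.1.1]) := by
              rw [List.append_assoc]
              exact (pvPairCost_snoc grafo r origen p.1.1).symm
            have hmeas :
                (pvNodes grafo).countP
                  (fun x => !(PySem.Set.contains (PySem.Set.add (PySem.Set.add V origen) p.1.1) x)) < N := by
              have hlt := pv_measure_lt grafo (PySem.Set.add V origen) p.1.1
                (Bool.eq_false_iff.mpr hc) (pv_mem_nodes p.2)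
              omega
            have hrec := ih p.1.1 (PySem.Set.add V origen) (r ++ [origen])
              ((acc.foldl (fun s ruta => pvVisita ruta (pvPairCost grafo ruta) s) s)) hmeas
            rw [hcost, hrec, ← List.foldl_append]
            exact iht
              (acc ++ pvBuscar destino grafo p.1.1 (PySem.Set.add V origen) (r ++ [origen])) s
      exact key (pvGet grafo origen).attach [] s

lemma pvVisita_some (ruta : List String) (c : Int)
    (s : Option (List String) × Option (List String) × Option Int × Int)
    (h : s.1.isSome = true ∨ s.2.2.1 = none) : (pvVisita ruta c s).1.isSome = true := by
  obtain ⟨m, p, mn, my⟩ := s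
  cases mn with
  | none => simp only [pvVisita]; split_ifs <;> simp_all
  | some m' =>
    simp only [pvVisita]
    split_ifs <;> simp_all

lemma pvFoldVisit_some (grafo : List (String × List (String × Int))) :
    ∀ (t : List (List String))
      (s : Option (List String) × Option (List String) × Option Int × Int),
      s.1.isSome = true →
      (t.foldl (fun s ruta => pvVisita ruta (pvPairCost grafo ruta) s) s).1.isSome = true := by
  intro t
  induction t with
  | nil => intro s h; simpa
  | cons r t ih => intro s h; exact ih _ (pvVisita_some _ _ _ (Or.inl h))

-- ===== VERDICT (by name: the statement is the Claim_ definition above) =====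
theorem rutas_mas_economica_cara_spec : Claim_equal_rutas_mas_economica_cara := by
  intro origen destino grafo _
  unfold Spec_rutas_mas_economica_cara rutas_mas_economica_cara rutas_mas_economica_cara_alt
  have hdfs := pvDfs_eq_fold destino grafo
      ((pvNodes grafo).countP
        (fun x => !(PySem.Set.contains (PySem.Set.add PySem.Set.empty origen) x)) + 1)
      origen PySem.Set.empty [] (none, none, none, 0) (Nat.lt_succ_self _)
  simp only [List.nil_append] at hdfs
  have hpc0 : pvPairCost grafo [origen] = 0 := rfl
  have hadd : PySem.Set.add PySem.Set.empty origen = [origen] := rfl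
  rw [hpc0, hadd] at hdfs
  have hf : pvScanStep grafo = fun s ruta => pvVisita ruta (pvPairCost grafo ruta) s :=
    funext fun s => funext fun ruta => pvScanStep_eq grafo s ruta
  cases htodas : pvBuscar destino grafo origen PySem.Set.empty [] with
  | nil =>
    rw [htodas] at hdfs
    simp [hdfs]
  | cons r t =>
    rw [htodas] at hdfs
    have hsome : ((r :: t).foldl (fun s ruta => pvVisita ruta (pvPairCost grafo ruta) s)
        ((none : Option (List String)), (none : Option (List String)), (none : Option Int), (0 : Int))).1.isSome = true := by
      simp only [List.foldl_cons]
      exact pvFoldVisit_some grafo t _ (pvVisita_some _ _ _ (Or.inr rfl))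
    rw [hadd, hdfs, hf]
    dsimp only
    rcases hF : (r :: t).foldl (fun s ruta => pvVisita ruta (pvPairCost grafo ruta) s)
        ((none : Option (List String)), (none : Option (List String)), (none : Option Int), (0 : Int))
      with ⟨m, p2, mn, my⟩
    cases m with
    | none =>
      rw [List.foldl_cons] at hF
      simp only [List.foldl_cons] at hsome
      rw [hF] at hsome
      simp at hsome
    | some mejor => rfl
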